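-- pv_equiv track=rewrite | github.com/msamedina/bionetverification | ec.py | rearrange_universe
-- ===== SOURCE A (Python) =====
-- def rearrange_universe(subsets, universe):
-- 	"""
-- 	Calculate the occurrences of numbers in subsets, and rearrange the universe by sorting the occurrences
-- 		Input:
-- 			arr: subset being calculated occurrences
-- 			universe: the universe array to be rearrange
-- 		Output:
-- 			occurrences_rep: universe representation by sorted occurrences
-- 	"""
--
-- 	# unlist the subsets for one long list
-- 	subsets = sum(subsets, [])
--
-- 	occurrences = []
-- 	for i in range(0, len(universe)):
-- 		occurrences.append(subsets.count(i + 1))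
-- 	occurrences_rep = sorted(range(len(occurrences)), reverse=True, key=lambda k: occurrences[k])
-- 	for i in range(0, len(occurrences_rep)):
-- 		occurrences_rep[i] += 1
-- 	return occurrences_rep
-- ===== SOURCE B (Python) =====
-- def rearrange_universe(subsets, universe):
--     U = len(universe)
--     total = sum(len(s) for s in subsets)
--     cnt = [0] * (U + 1)
--     for sub in subsets:
--         for v in sub:
--             if 1 <= v <= U:
--                 cnt[v] += 1
--     buckets = [[] for _ in range(total + 1)]
--     for v in range(1, U + 1):
--         buckets[cnt[v]].append(v)
--     out = []
--     for b in reversed(buckets):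
--         out += b
--     return out
-- ===== Notes on version B (the rewrite author's own statement) =====
-- stated objective: faster
-- what changed: Replaced the per-universe-element list.count scans plus a comparison sort of the index range by a single tallying pass over the flattened subsets into a count array followed by a bucket (counting) sort emitting high counts first with ascending ties.
import Mathlib
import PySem

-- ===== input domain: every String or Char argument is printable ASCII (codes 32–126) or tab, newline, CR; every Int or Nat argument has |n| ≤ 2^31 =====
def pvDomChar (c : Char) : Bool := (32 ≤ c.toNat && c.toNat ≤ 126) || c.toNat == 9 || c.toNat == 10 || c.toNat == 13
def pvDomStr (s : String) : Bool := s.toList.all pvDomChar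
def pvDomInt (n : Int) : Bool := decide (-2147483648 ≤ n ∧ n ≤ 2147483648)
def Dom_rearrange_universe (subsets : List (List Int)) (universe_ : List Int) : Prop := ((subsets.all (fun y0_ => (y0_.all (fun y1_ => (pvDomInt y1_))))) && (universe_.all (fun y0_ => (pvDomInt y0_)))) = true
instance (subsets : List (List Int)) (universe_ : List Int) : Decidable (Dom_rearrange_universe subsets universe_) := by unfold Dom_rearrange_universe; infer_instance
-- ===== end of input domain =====

-- B replaces A's per-element list.count scan and comparison sort by a one-pass count
-- array plus a bucket (counting) sort; objective: faster (O(T + U·T) work in A drops to O(T + U)-ish).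

-- ===== PORT A =====
-- literal transliteration of A: flatten by summed append, build occurrences with
-- repeated count, stable reverse sort of the index range, then the in-place +1 loop
-- (ported as a fold of List.set; the index i comes from range(0, len) so i.toNat is exact).
def rearrange_universe (subsets : List (List Int)) (universe_ : List Int) : List Int :=
  let subsets' : List Int := subsets.foldl (fun acc s => acc ++ s) []
  let occurrences : List Int :=
    (PySem.List.pyRange 0 (universe_.length : Int)).foldl
      (fun acc i => acc ++ [(PySem.List.count subsets' (i + 1) : Int)]) []
  let occurrences_rep : List Int :=
    PySem.List.sorted (PySem.List.pyRange 0 (occurrences.length : Int))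
      (fun k => PySem.List.pyGetD occurrences k 0) true
  (PySem.List.pyRange 0 (occurrences_rep.length : Int)).foldl
    (fun l i => l.set i.toNat (PySem.List.pyGetD l i 0 + 1)) occurrences_rep

-- ===== PORT B =====
-- literal transliteration of B (Source B): one pass tallying values 1..U into a count
-- array (counts are nonnegative, tracked as Nat — exact), buckets indexed by count,
-- output by concatenating the reversed bucket list.
def rearrange_universe_alt (subsets : List (List Int)) (universe_ : List Int) : List Int :=
  let U : Nat := universe_.length
  let total : Nat := (subsets.map List.length).sum
  let cnt : List Nat :=
    subsets.foldl (fun c sub =>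
      sub.foldl (fun c v =>
        if 1 ≤ v ∧ v ≤ (U : Int) then c.set v.toNat (c.getD v.toNat 0 + 1) else c) c)
      (List.replicate (U + 1) 0)
  let buckets : List (List Int) :=
    (PySem.List.pyRange 1 ((U : Int) + 1)).foldl
      (fun b v => b.set (cnt.getD v.toNat 0) (b.getD (cnt.getD v.toNat 0) [] ++ [v]))
      (List.replicate (total + 1) [])
  buckets.reverse.foldl (fun out b => out ++ b) []

-- ===== PRECONDITION & SPEC =====
def Spec_rearrange_universe (subsets : List (List Int)) (universe_ : List Int) (out : List Int) : Prop := out = rearrange_universe_alt subsets universe_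
instance (subsets : List (List Int)) (universe_ : List Int) (out : List Int) : Decidable (Spec_rearrange_universe subsets universe_ out) := by unfold Spec_rearrange_universe; infer_instance

-- ===== CLAIM (what is proved, stated in full; the proofs are below) =====
def Claim_equal_rearrange_universe : Prop := ∀ (subsets : List (List Int)) (universe_ : List Int), Dom_rearrange_universe subsets universe_ → Spec_rearrange_universe subsets universe_ (rearrange_universe subsets universe_)

-- ===== LEMMAS AND PROOFS =====

-- the strict order that characterises Python's stable reverse sort of a strictly
-- increasing list of indices: bigger key first, ties by smaller index first
def pvR (key : Int → Int) (a b : Int) : Prop := key b < key a ∨ (key a = key b ∧ a < b)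

theorem pv_insertBy_perm {α : Type} (bf : α → α → Bool) (x : α) (ys : List α) :
    (PySem.List.insertBy bf x ys).Perm (x :: ys) := by
  induction ys with
  | nil => simp [PySem.List.insertBy]
  | cons y ys ih =>
    simp only [PySem.List.insertBy]
    split
    · exact List.Perm.refl _
    · exact (List.Perm.cons y ih).trans (List.Perm.swap x y ys)

theorem pv_foldl_insertBy_perm {α : Type} (bf : α → α → Bool) :
    ∀ (xs acc : List α),
      (xs.foldl (fun acc x => PySem.List.insertBy bf x acc) acc).Perm (acc ++ xs) := by
  intro xs
  induction xs with
  | nil => simp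
  | cons x xs ih =>
    intro acc
    refine (ih (PySem.List.insertBy bf x acc)).trans ?_
    refine ((pv_insertBy_perm bf x acc).append_right xs).trans ?_
    exact List.perm_middle.symm

theorem pv_insertBy_pairwise (key : Int → Int) (x : Int) :
    ∀ (acc : List Int), acc.Pairwise (pvR key) → (∀ b ∈ acc, b < x) →
      (PySem.List.insertBy (fun a b => decide (key b < key a)) x acc).Pairwise (pvR key) := by
  intro acc
  induction acc with
  | nil => intro _ _; simp [PySem.List.insertBy]
  | cons y ys ih =>
    intro hp hlt
    simp only [PySem.List.insertBy]
    split
    · rename_i hxy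
      refine List.Pairwise.cons ?_ hp
      intro z hz
      rcases List.mem_cons.1 hz with rfl | hz
      · exact Or.inl (by simpa using hxy)
      · rcases (List.pairwise_cons.1 hp).1 z hz with h | ⟨h, _⟩
        · exact Or.inl (lt_trans h (by simpa using hxy))
        · exact Or.inl (h ▸ (by simpa using hxy))
    · rename_i hxy
      have hyx : ¬ key y < key x := by simpa using hxy
      refine List.Pairwise.cons ?_ (ih (List.pairwise_cons.1 hp).2
        (fun b hb => hlt b (List.mem_cons_of_mem _ hb)))
      intro z hz
      rcases (PySem.List.mem_insertBy _ x z ys).1 hz with rfl | hz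
      · rcases lt_or_eq_of_le (le_of_not_gt hyx) with h | h
        · exact Or.inl h
        · exact Or.inr ⟨h.symm, hlt y (List.mem_cons_self)⟩
      · exact (List.pairwise_cons.1 hp).1 z hz

theorem pv_foldl_insertBy_pairwise (key : Int → Int) :
    ∀ (xs acc : List Int), acc.Pairwise (pvR key) → (∀ b ∈ acc, ∀ x ∈ xs, b < x) →
      xs.Pairwise (· < ·) →
      (xs.foldl (fun acc x => PySem.List.insertBy (fun a b => decide (key b < key a)) x acc) acc).Pairwise (pvR key) := by
  intro xs
  induction xs with
  | nil => intro acc hp _ _; simpa using hp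
  | cons x xs ih =>
    intro acc hp hlt hxs
    simp only [List.foldl_cons]
    refine ih _ (pv_insertBy_pairwise key x acc hp
      (fun b hb => hlt b hb x (List.mem_cons_self))) ?_ (List.pairwise_cons.1 hxs).2
    intro b hb x' hx'
    rcases (PySem.List.mem_insertBy _ x b acc).1 hb with rfl | hb
    · exact (List.pairwise_cons.1 hxs).1 x' hx'
    · exact hlt b hb x' (List.mem_cons_of_mem _ hx')

-- stable reverse sort is the unique pvR-sorted permutation of a strictly increasing list
theorem pv_sorted_rev_eq (key : Int → Int) (xs ys : List Int)
    (hxs : xs.Pairwise (· < ·)) (hperm : ys.Perm xs) (hpair : ys.Pairwise (pvR key)) :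
    PySem.List.sorted xs key true = ys := by
  rw [PySem.List.sorted_rev_eq_foldl_insertBy]
  have hperm' : (xs.foldl (fun acc x => PySem.List.insertBy (fun a b => decide (key b < key a)) x acc) []).Perm xs := by
    simpa using pv_foldl_insertBy_perm _ xs []
  have hpair' := pv_foldl_insertBy_pairwise key xs [] (by simp) (by simp) hxs
  refine List.Perm.eq_of_pairwise ?_ hpair' hpair (hperm'.trans hperm.symm)
  intro a b _ _ hab hba
  rcases hab with h1 | ⟨e1, l1⟩ <;> rcases hba with h2 | ⟨e2, l2⟩ <;> omega

-- flat-fold helpers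
theorem pv_foldl_append_eq_flatten {α : Type} (l : List (List α)) :
    l.foldl (fun acc s => acc ++ s) [] = l.flatten := by
  simpa using PySem.List.foldl_append_eq_flatMap (fun s => s) l []

-- partition permutation: gluing the filters over distinct bucket indices permutes xs
theorem pv_flatMap_filter_perm {α : Type} [DecidableEq α] (g : α → Nat) :
    ∀ (ds : List Nat) (xs : List α), ds.Nodup → (∀ x ∈ xs, g x ∈ ds) →
      (ds.flatMap (fun d => xs.filter (fun x => g x == d))).Perm xs := by
  intro ds
  induction ds with
  | nil =>
    intro xs _ hm
    simp [List.eq_nil_iff_forall_not_mem.2 (fun x hx => by simpa using hm x hx)]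
  | cons d ds ih =>
    intro xs hnd hmem
    rw [List.flatMap_cons]
    have hstep : ds.flatMap (fun d' => xs.filter (fun x => g x == d')) =
        ds.flatMap (fun d' => (xs.filter (fun x => !(g x == d))).filter (fun x => g x == d')) := by
      refine List.flatMap_congr ?_
      intro d' hd'
      rw [List.filter_filter]
      refine (List.filter_congr ?_).symm
      intro x _
      by_cases h : g x = d'
      · have : d' ≠ d := fun e => (List.nodup_cons.1 hnd).1 (e ▸ hd')
        simp [h, this]
      · simp [h]
    rw [hstep]
    have hperm2 := ih (xs.filter (fun x => !(g x == d))) (List.nodup_cons.1 hnd).2 ?_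
    · exact (List.Perm.append_left _ hperm2).trans (List.filter_append_perm _ xs)
    · intro x hx
      have hx' := List.mem_filter.1 hx
      rcases List.mem_cons.1 (hmem x hx'.1) with h | h
      · exact absurd h (by simpa using hx'.2)
      · exact h

-- shift lemma: range(1, U+1) = [k+1 for k in range(0, U)]
theorem pv_pyRange_shift (n : Nat) :
    PySem.List.pyRange 1 ((n : Int) + 1) = (PySem.List.pyRange 0 (n : Int)).map (· + 1) := by
  induction n with
  | zero => rfl
  | succ n ih =>
    have h2 : ((n + 1 : Nat) : Int) = (n : Int) + 1 := by push_cast; ring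
    rw [h2, PySem.List.pyRange_one_succ_right (by omega : (1:Int) ≤ (n : Int) + 1),
        PySem.List.pyRange_one_succ_right (by omega : (0:Int) ≤ (n : Int)), ih]
    simp

-- the in-place "+= 1" loop is pointwise increment
theorem pv_inc_fold_aux (n : Nat) :
    ∀ (l : List Int), n ≤ l.length →
      (PySem.List.pyRange 0 (n : Int)).foldl
        (fun l i => l.set i.toNat (PySem.List.pyGetD l i 0 + 1)) l =
      (l.take n).map (· + 1) ++ l.drop n := by
  induction n with
  | zero => intro l _; simp
  | succ n ih =>
    intro l hn
    have h1 : ((n + 1 : Nat) : Int) = (n : Int) + 1 := by push_cast; ring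
    have hn' : n < l.length := by omega
    rw [h1, PySem.List.pyRange_one_succ_right (by omega : (0:Int) ≤ (n:Int)), List.foldl_append,
        ih l (by omega)]
    have hlenT : ((l.take n).map (· + 1)).length = n := by
      simp [List.length_take, Nat.min_eq_left (le_of_lt hn')]
    have hL : (((l.take n).map (· + 1)) ++ l.drop n).length = l.length := by
      simp; omega
    simp only [List.foldl_cons, List.foldl_nil, Int.toNat_natCast]
    have hget : PySem.List.pyGetD ((l.take n).map (· + 1) ++ l.drop n) (↑n) 0 = l[n] := by
      rw [PySem.List.pyGetD_eq_getElem _ _ (by omega) (by rw [hL]; exact_mod_cast hn')]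
      simp only [Int.toNat_natCast]
      rw [List.getElem_append_right (by omega : ((l.take n).map (· + 1)).length ≤ n)]
      rw [List.getElem_drop]
      have he : n + (n - ((l.take n).map (· + 1)).length) = n := by rw [hlenT]; omega
      simp only [he]
    rw [hget]
    rw [List.set_append_right _ _ (by omega : ((l.take n).map (· + 1)).length ≤ n)]
    rw [List.drop_eq_getElem_cons hn']
    simp only [hlenT, Nat.sub_self, List.set_cons_zero]
    have hrhs : List.take (n + 1) (List.map (fun x => x + 1) l) = List.take n (List.map (fun x => x + 1) l) ++ [l[n] + 1] := by
      rw [List.take_add_one, List.getElem?_map, List.getElem?_eq_getElem hn']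
      simp
    simp [List.map_take, hrhs, List.append_assoc]

theorem pv_inc_fold (l : List Int) :
    (PySem.List.pyRange 0 (l.length : Int)).foldl
      (fun l i => l.set i.toNat (PySem.List.pyGetD l i 0 + 1)) l = l.map (· + 1) := by
  simpa using pv_inc_fold_aux l.length l (le_refl _)

-- cnt invariant: after tallying the processed elements, slot j (1 ≤ j ≤ U) holds count j
theorem pv_cnt_fold (U : Nat) :
    ∀ (xs : List Int) (p : List Int) (c : List Nat),
      c.length = U + 1 → (∀ j : Nat, 1 ≤ j → j ≤ U → c.getD j 0 = p.count (j : Int)) →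
      (xs.foldl (fun c v =>
          if 1 ≤ v ∧ v ≤ (U : Int) then c.set v.toNat (c.getD v.toNat 0 + 1) else c) c).length = U + 1 ∧
      (∀ j : Nat, 1 ≤ j → j ≤ U →
        (xs.foldl (fun c v =>
          if 1 ≤ v ∧ v ≤ (U : Int) then c.set v.toNat (c.getD v.toNat 0 + 1) else c) c).getD j 0 = (p ++ xs).count (j : Int)) := by
  intro xs
  induction xs with
  | nil =>
    intro p c h1 h2
    refine ⟨h1, fun j hj1 hj2 => by simpa using h2 j hj1 hj2⟩
  | cons x xs ih =>
    intro p c h1 h2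
    simp only [List.foldl_cons]
    have happ : (p ++ [x]) ++ xs = p ++ x :: xs := by simp
    have hlen : (if 1 ≤ x ∧ x ≤ (U : Int) then c.set x.toNat (c.getD x.toNat 0 + 1) else c).length = U + 1 := by
      split <;> simp [h1]
    have hcnt : ∀ j : Nat, 1 ≤ j → j ≤ U →
        (if 1 ≤ x ∧ x ≤ (U : Int) then c.set x.toNat (c.getD x.toNat 0 + 1) else c).getD j 0 = (p ++ [x]).count (j : Int) := by
      intro j hj1 hj2
      by_cases hx : 1 ≤ x ∧ x ≤ (U : Int)
      · rw [if_pos hx]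
        by_cases hxj : x = (j : Int)
        · have htn : x.toNat = j := by omega
          have hjlt : j < c.length := by omega
          rw [List.getD_eq_getElem?_getD, List.getElem?_set, htn, if_pos rfl, if_pos hjlt,
              Option.getD_some, h2 j hj1 hj2, List.count_append, hxj]
          simp
        · have htn : x.toNat ≠ j := by omega
          rw [List.getD_eq_getElem?_getD, List.getElem?_set, if_neg htn,
              ← List.getD_eq_getElem?_getD, h2 j hj1 hj2]
          have : List.count ((j : Int)) [x] = 0 := by
            simp [List.count_singleton]
            omega
          simp [List.count_append, this]
      · rw [if_neg hx, h2 j hj1 hj2]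
        have hne : x ≠ (j : Int) := by omega
        have : List.count ((j : Int)) [x] = 0 := by
          simp [List.count_singleton]
          omega
        simp [List.count_append, this]
    have key := ih (p ++ [x]) _ hlen hcnt
    rw [happ] at key
    exact key

-- buckets invariant: bucket d collects, in order, the processed values whose tally is d
theorem pv_buck_fold (total : Nat) (g : Int → Nat) :
    ∀ (xs : List Int) (p : List Int) (b : List (List Int)),
      (∀ v ∈ xs, g v ≤ total) →
      b.length = total + 1 → (∀ d : Nat, d ≤ total → b.getD d [] = p.filter (fun v => g v == d)) →
      (xs.foldl (fun b v => b.set (g v) (b.getD (g v) [] ++ [v])) b).length = total + 1 ∧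
      (∀ d : Nat, d ≤ total →
        (xs.foldl (fun b v => b.set (g v) (b.getD (g v) [] ++ [v])) b).getD d [] = (p ++ xs).filter (fun v => g v == d)) := by
  intro xs
  induction xs with
  | nil =>
    intro p b _ h1 h2
    refine ⟨h1, fun d hd => by simpa using h2 d hd⟩
  | cons v vs ih =>
    intro p b hg h1 h2
    simp only [List.foldl_cons]
    have hgv : g v ≤ total := hg v List.mem_cons_self
    have happ : (p ++ [v]) ++ vs = p ++ v :: vs := by simp
    have hlen : (b.set (g v) (b.getD (g v) [] ++ [v])).length = total + 1 := by simp [h1]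
    have hcnt : ∀ d : Nat, d ≤ total →
        (b.set (g v) (b.getD (g v) [] ++ [v])).getD d [] = (p ++ [v]).filter (fun w => g w == d) := by
      intro d hd
      by_cases hdv : g v = d
      · have hlt : g v < b.length := by omega
        rw [List.getD_eq_getElem?_getD, List.getElem?_set, if_pos hdv, if_pos hlt,
            Option.getD_some]
        have hfv : List.filter (fun w => g w == d) [v] = [v] := by simp [hdv]
        rw [List.filter_append, hfv, ← hdv, h2 (g v) hgv]
      · rw [List.getD_eq_getElem?_getD, List.getElem?_set, if_neg hdv,
            ← List.getD_eq_getElem?_getD, h2 d hd]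
        have hfv : List.filter (fun w => g w == d) [v] = [] := by simp [hdv]
        simp [List.filter_append, hfv]
    have key := ih (p ++ [v]) _ (fun w hw => hg w (List.mem_cons_of_mem _ hw)) hlen hcnt
    rw [happ] at key
    exact key

-- descending buckets of equal-key elements, each ascending, are pvR-sorted
theorem pv_chunks_pairwise (key : Int → Int) (g : Int → Nat) (xs : List Int)
    (hxs : xs.Pairwise (· < ·)) (hkey : ∀ k ∈ xs, key k = (g k : Int)) :
    ∀ ds : List Nat, ds.Pairwise (· > ·) →
      (ds.flatMap (fun d => xs.filter (fun k => g k == d))).Pairwise (pvR key) := by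
  intro ds
  induction ds with
  | nil => intro _; simp
  | cons d ds ih =>
    intro hds
    rw [List.flatMap_cons, List.pairwise_append]
    refine ⟨?_, ih (List.pairwise_cons.1 hds).2, ?_⟩
    · refine (hxs.filter _).imp_of_mem ?_
      intro a b ha hb hab
      have ha' := List.mem_filter.1 ha
      have hb' := List.mem_filter.1 hb
      have hga : g a = d := by simpa using ha'.2
      have hgb : g b = d := by simpa using hb'.2
      exact Or.inr ⟨by rw [hkey a ha'.1, hkey b hb'.1, hga, hgb], hab⟩
    · intro a ha b hb
      have ha' := List.mem_filter.1 ha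
      have hga : g a = d := by simpa using ha'.2
      rcases List.mem_flatMap.1 hb with ⟨d', hd', hbf⟩
      have hb' := List.mem_filter.1 hbf
      have hgb : g b = d' := by simpa using hb'.2
      have hlt : d' < d := (List.pairwise_cons.1 hds).1 d' hd'
      refine Or.inl ?_
      rw [hkey a ha'.1, hkey b hb'.1, hga, hgb]
      exact_mod_cast hlt

-- ===== main assembly =====
theorem pv_main (subsets : List (List Int)) (universe_ : List Int) :
    rearrange_universe subsets universe_ = rearrange_universe_alt subsets universe_ := by
  -- abbreviations
  let g' : Int → Nat := fun k => PySem.List.count subsets.flatten (k + 1)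
  let h' : Int → Nat := fun v => PySem.List.count subsets.flatten v
  let ds : List Nat := (List.range (subsets.flatten.length + 1)).reverse
  let occ : List Int := (PySem.List.pyRange 0 (universe_.length : Int)).map (fun i => (PySem.List.count subsets.flatten (i + 1) : Int))
  let keyA : Int → Int := fun k => PySem.List.pyGetD occ k 0
  -- ===== A side =====
  have hsum : subsets.foldl (fun acc s => acc ++ s) ([] : List Int) = subsets.flatten :=
    pv_foldl_append_eq_flatten subsets
  have hocc : (PySem.List.pyRange 0 (universe_.length : Int)).foldl
      (fun acc i => acc ++ [(PySem.List.count subsets.flatten (i + 1) : Int)]) [] = occ := by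
    simpa using PySem.List.foldl_append_singleton_eq_map
      (fun i => (PySem.List.count subsets.flatten (i + 1) : Int)) (PySem.List.pyRange 0 (universe_.length : Int)) []
  have hlocc : occ.length = universe_.length := by
    show ((PySem.List.pyRange 0 (universe_.length : Int)).map _).length = universe_.length
    rw [PySem.List.pyRange_zero_natCast]
    simp
  have hxspair : (PySem.List.pyRange 0 (universe_.length : Int)).Pairwise (· < ·) := by
    rw [PySem.List.pyRange_zero_natCast]
    exact List.pairwise_map.2 (List.pairwise_lt_range.imp (by intro a b hab; exact_mod_cast hab))
  have hkmem : ∀ k ∈ PySem.List.pyRange 0 (universe_.length : Int), keyA k = (g' k : Int) := by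
    intro k hk
    rcases PySem.List.mem_pyRange_one.1 hk with ⟨hk0, hkU⟩
    have hkn : k = ((k.toNat : Nat) : Int) := by omega
    have hklt : k.toNat < universe_.length := by omega
    show PySem.List.pyGetD occ k 0 = _
    rw [hkn, PySem.List.pyGetD_map_pyRange (fun i => (PySem.List.count subsets.flatten (i + 1) : Int)) universe_.length k.toNat 0 hklt]
  have hdsnodup : ds.Nodup := List.nodup_reverse.2 List.nodup_range
  have hdsdesc : ds.Pairwise (· > ·) := List.pairwise_reverse.2 List.pairwise_lt_range
  have hgmem : ∀ k ∈ PySem.List.pyRange 0 (universe_.length : Int), g' k ∈ ds := by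
    intro k _
    rw [List.mem_reverse, List.mem_range]
    exact Nat.lt_succ_of_le List.count_le_length
  have hperm : (ds.flatMap (fun d => (PySem.List.pyRange 0 (universe_.length : Int)).filter (fun k => g' k == d))).Perm
      (PySem.List.pyRange 0 (universe_.length : Int)) :=
    pv_flatMap_filter_perm g' ds _ hdsnodup hgmem
  have hpair := pv_chunks_pairwise keyA g' (PySem.List.pyRange 0 (universe_.length : Int)) hxspair hkmem ds hdsdesc
  have hrep : PySem.List.sorted (PySem.List.pyRange 0 (universe_.length : Int)) keyA true =
      ds.flatMap (fun d => (PySem.List.pyRange 0 (universe_.length : Int)).filter (fun k => g' k == d)) :=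
    pv_sorted_rev_eq keyA _ _ hxspair hperm hpair
  have hA : rearrange_universe subsets universe_ =
      (ds.flatMap (fun d => (PySem.List.pyRange 0 (universe_.length : Int)).filter (fun k => g' k == d))).map (· + 1) := by
    show (let subsets' := subsets.foldl (fun acc s => acc ++ s) [];
      let occurrences : List Int :=
        (PySem.List.pyRange 0 (universe_.length : Int)).foldl
          (fun acc i => acc ++ [(PySem.List.count subsets' (i + 1) : Int)]) [];
      let occurrences_rep : List Int :=
        PySem.List.sorted (PySem.List.pyRange 0 (occurrences.length : Int))
          (fun k => PySem.List.pyGetD occurrences k 0) true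
      (PySem.List.pyRange 0 (occurrences_rep.length : Int)).foldl
        (fun l i => l.set i.toNat (PySem.List.pyGetD l i 0 + 1)) occurrences_rep) = _
    simp only [hsum, hocc, hlocc]
    rw [pv_inc_fold, hrep]
  -- ===== B side =====
  have hcnt := pv_cnt_fold universe_.length subsets.flatten [] (List.replicate (universe_.length + 1) 0) (by simp)
    (by intro j _ _; simp)
  obtain ⟨hclen, hcval⟩ := hcnt
  set cnt : List Nat := subsets.flatten.foldl
    (fun c v => if 1 ≤ v ∧ v ≤ (universe_.length : Int) then c.set v.toNat (c.getD v.toNat 0 + 1) else c)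
    (List.replicate (universe_.length + 1) 0) with hcntdef
  have hcval' : ∀ v : Int, 1 ≤ v → v ≤ (universe_.length : Int) → cnt.getD v.toNat 0 = h' v := by
    intro v h1v h2v
    have hjn : ((v.toNat : Nat) : Int) = v := by omega
    have := hcval v.toNat (by omega) (by omega)
    rw [hjn] at this
    simpa using this
  have hgb : ∀ v ∈ PySem.List.pyRange 1 ((universe_.length : Int) + 1), cnt.getD v.toNat 0 ≤ subsets.flatten.length := by
    intro v hv
    rcases PySem.List.mem_pyRange_one.1 hv with ⟨h1v, h2v⟩
    rw [hcval' v h1v (by omega)]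
    exact List.count_le_length
  have hbuck := pv_buck_fold subsets.flatten.length (fun v => cnt.getD v.toNat 0)
    (PySem.List.pyRange 1 ((universe_.length : Int) + 1)) [] (List.replicate (subsets.flatten.length + 1) []) hgb
    (by simp) (by intro d _; simp)
  obtain ⟨hblen, hbval⟩ := hbuck
  set buckets : List (List Int) := (PySem.List.pyRange 1 ((universe_.length : Int) + 1)).foldl
    (fun b v => b.set (cnt.getD v.toNat 0) (b.getD (cnt.getD v.toNat 0) [] ++ [v]))
    (List.replicate (subsets.flatten.length + 1) []) with hbdef
  have hbval' : ∀ d : Nat, d ≤ subsets.flatten.length →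
      buckets.getD d [] = (PySem.List.pyRange 1 ((universe_.length : Int) + 1)).filter (fun v => h' v == d) := by
    intro d hd
    rw [hbval d hd]
    simp only [List.nil_append]
    refine List.filter_congr ?_
    intro v hv
    rcases PySem.List.mem_pyRange_one.1 hv with ⟨h1v, h2v⟩
    rw [hcval' v h1v (by omega)]
  have hbuckets : buckets = (List.range (subsets.flatten.length + 1)).map
      (fun d => (PySem.List.pyRange 1 ((universe_.length : Int) + 1)).filter (fun v => h' v == d)) := by
    refine List.ext_getElem (by simp [hblen]) ?_
    intro i hi1 hi2
    have hitot : i ≤ subsets.flatten.length := by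
      have := hi1
      rw [hblen] at this
      omega
    have h1 : buckets[i] = buckets.getD i [] := (List.getD_eq_getElem buckets [] hi1).symm
    rw [h1, hbval' i hitot]
    simp
  have hB : rearrange_universe_alt subsets universe_ =
      ds.flatMap (fun d => (PySem.List.pyRange 1 ((universe_.length : Int) + 1)).filter (fun v => h' v == d)) := by
    show (let subsets.flatten.length' : Nat := (subsets.map List.length).sum;
      let cnt' : List Nat :=
        subsets.foldl (fun c sub =>
          sub.foldl (fun c v =>
            if 1 ≤ v ∧ v ≤ (universe_.length : Int) then c.set v.toNat (c.getD v.toNat 0 + 1) else c) c)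
          (List.replicate (universe_.length + 1) 0);
      let buckets' : List (List Int) :=
        (PySem.List.pyRange 1 ((universe_.length : Int) + 1)).foldl
          (fun b v => b.set (cnt'.getD v.toNat 0) (b.getD (cnt'.getD v.toNat 0) [] ++ [v]))
          (List.replicate (subsets.flatten.length' + 1) []);
      buckets'.reverse.foldl (fun out b => out ++ b) []) = _
    have htot : (subsets.map List.length).sum = subsets.flatten.length := List.length_flatten.symm
    simp only [htot, ← List.foldl_flatten, ← hcntdef, ← hbdef, hbuckets]
    rw [pv_foldl_append_eq_flatten]
    rw [← List.map_reverse, ← List.flatMap_def]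
  -- ===== conclude =====
  rw [hA, hB, List.map_flatMap]
  refine List.flatMap_congr ?_
  intro d _
  rw [pv_pyRange_shift universe_.length, List.filter_map]
  rfl

-- ===== VERDICT (by name: the statement is the Claim_ definition above) =====
theorem rearrange_universe_spec : Claim_equal_rearrange_universe := by
  intro subsets universe_ _
  exact pv_main subsets universe_
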